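-- pv_equiv track=rewrite | github.com/Johnberman-J/python_prac | Done/Q21-fail.py | solution
-- ===== SOURCE A (Python) =====
-- def solution(s):
--     answer = ''
--     words_arr = s.split(" ")
--     ans_arr = []
--     for word in words_arr :
--         for i in range(len(word)):
--             if i%2==0:
--                 answer = answer + word[i].upper()
--             else:
--                 answer = answer + word[i]
--         ans_arr.append(answer)
--         answer = ""
--
--     answer = " ".join(ans_arr)
--     return answer
-- ===== SOURCE B (Python) =====
-- def solution(s):
--     out = []
--     k = 0
--     for ch in s:
--         if ch == ' ':
--             out.append(ch)
--             k = 0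
--         else:
--             out.append(ch.upper() if k % 2 == 0 else ch)
--             k += 1
--     return ''.join(out)
-- ===== Notes on version B (the rewrite author's own statement) =====
-- stated objective: simpler
-- what changed: Replaces the split-into-words / nested per-word index loop / join pipeline with one stateful pass over the characters that resets a per-word position counter at each space.
import Mathlib
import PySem

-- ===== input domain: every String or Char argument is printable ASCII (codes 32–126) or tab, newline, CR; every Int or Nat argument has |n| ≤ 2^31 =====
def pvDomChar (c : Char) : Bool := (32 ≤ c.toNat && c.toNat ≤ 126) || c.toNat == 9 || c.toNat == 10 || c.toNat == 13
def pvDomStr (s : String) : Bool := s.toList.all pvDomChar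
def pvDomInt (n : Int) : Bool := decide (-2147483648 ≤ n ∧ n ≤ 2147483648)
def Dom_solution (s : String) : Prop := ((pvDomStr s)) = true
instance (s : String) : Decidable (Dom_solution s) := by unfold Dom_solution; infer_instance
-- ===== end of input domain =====

-- B replaces A's split/nested-index-loop/join with a single stateful pass (simpler, one loop).

-- ===== PORT A =====
def solAStep (ans : List Char) (p : Int × Char) : List Char :=
  if PySem.Int.mod p.1 2 == 0 then ans ++ [PySem.Chars.upperChar p.2] else ans ++ [p.2]

def solAWord (w : List Char) : List Char :=
  (PySem.List.enumerate w).foldl solAStep []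

def solution (s : String) : String :=
  String.mk (PySem.Chars.join [' ']
    ((PySem.Chars.splitOn s.toList [' ']).foldl (fun arr w => arr ++ [solAWord w]) []))

-- ===== PORT B =====
def solBStep (st : List Char × Nat) (c : Char) : List Char × Nat :=
  if c == ' ' then (st.1 ++ [c], 0)
  else (st.1 ++ [if st.2 % 2 == 0 then PySem.Chars.upperChar c else c], st.2 + 1)

def solution_alt (s : String) : String :=
  String.mk (s.toList.foldl solBStep (([] : List Char), (0 : Nat))).1

-- ===== PRECONDITION & SPEC =====
def Spec_solution (s : String) (out : String) : Prop := out = solution_alt s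
instance (s : String) (out : String) : Decidable (Spec_solution s out) := by unfold Spec_solution; infer_instance

-- ===== CLAIM (what is proved, stated in full; the proofs are below) =====
def Claim_equal_solution : Prop := ∀ (s : String), Dom_solution s → Spec_solution s (solution s)

-- ===== LEMMAS AND PROOFS =====

/-- transform one character at in-word position `k` -/
def trc (k : Nat) (c : Char) : Char := if k % 2 == 0 then PySem.Chars.upperChar c else c

/-- A's per-word transform starting at position `k`, written structurally -/
def fk : Nat → List Char → List Char
  | _, [] => []
  | k, c :: w => trc k c :: fk (k + 1) w

/-- the common result: one pass with a counter reset at spaces -/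
def specFun : List Char → Nat → List Char
  | [], _ => []
  | c :: cs, k => if c = ' ' then ' ' :: specFun cs 0 else trc k c :: specFun cs (k + 1)

/-- split on a single space, carrying the current word -/
def splitAux (w : List Char) : List Char → List (List Char)
  | [] => [w]
  | c :: rest => if c = ' ' then w :: splitAux [] rest else splitAux (w ++ [c]) rest

lemma go_spec : ∀ (fuel : Nat) (l cur : List Char) (acc : List (List Char)),
    l.length < fuel →
    PySem.Chars.splitOn.go [' '] fuel l cur acc = acc.reverse ++ splitAux cur.reverse l := by
  intro fuel
  induction fuel with
  | zero => intro l cur acc h; omega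
  | succ n ih =>
    intro l cur acc h
    cases l with
    | nil => simp [PySem.Chars.splitOn.go, splitAux]
    | cons c rest =>
      by_cases hc : c = ' '
      · subst hc
        simp only [PySem.Chars.splitOn.go, List.isPrefixOf, BEq.rfl, Bool.true_and,
          List.isPrefixOf_nil_left, if_pos]
        rw [ih]
        · simp [splitAux]
        · simpa using Nat.lt_of_succ_lt_succ h
      · have hpre : List.isPrefixOf [' '] (c :: rest) = false := by
          simp [List.isPrefixOf]
          intro hco; exact absurd hco.symm hc
        simp only [PySem.Chars.splitOn.go, hpre, Bool.false_eq_true, if_false]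
        rw [ih]
        · simp [splitAux, hc]
        · simpa using Nat.lt_of_succ_lt_succ h

lemma splitOn_eq (l : List Char) : PySem.Chars.splitOn l [' '] = splitAux [] l := by
  have := go_spec (l.length + 1) l [] [] (by omega)
  simpa [PySem.Chars.splitOn] using this

lemma splitAux_ne_nil (w l : List Char) : splitAux w l ≠ [] := by
  induction l generalizing w with
  | nil => simp [splitAux]
  | cons c rest ih => by_cases hc : c = ' ' <;> simp [splitAux, hc, ih]

lemma fk_append (k : Nat) (xs ys : List Char) :
    fk k (xs ++ ys) = fk k xs ++ fk (k + xs.length) ys := by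
  induction xs generalizing k with
  | nil => simp [fk]
  | cons c xs ih =>
    simp [fk, ih (k + 1)]
    ring_nf

lemma solAWord_go (w : List Char) : ∀ (k : Nat) (acc : List Char),
    (PySem.List.enumerate w (k : Int)).foldl solAStep acc = acc ++ fk k w := by
  induction w with
  | nil => intro k acc; simp [PySem.List.enumerate_nil, fk]
  | cons c w ih =>
    intro k acc
    have hm : PySem.Int.mod (k : Int) 2 = ((k % 2 : Nat) : Int) := by
      simp [PySem.Int.mod, Int.fmod_eq_emod]
    have hcast : ((k : Int) + 1) = ((k + 1 : Nat) : Int) := by push_cast; ring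
    simp only [PySem.List.enumerate_cons, List.foldl_cons, hcast, ih]
    simp [solAStep, fk, trc, hm]
    by_cases hk : k % 2 = 0
    · have h2 : (2 : Int) ∣ (k : Int) := by omega
      simp [hk, h2]
    · have h2 : ¬ (2 : Int) ∣ (k : Int) := by omega
      simp [hk, h2]

lemma solAWord_eq (w : List Char) : solAWord w = fk 0 w := by
  simpa using solAWord_go w 0 []

lemma foldl_snoc_eq_map (ws : List (List Char)) (acc : List (List Char)) :
    ws.foldl (fun arr w => arr ++ [solAWord w]) acc = acc ++ ws.map solAWord := by
  induction ws generalizing acc with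
  | nil => simp
  | cons w ws ih => simp [ih]

lemma join_map_splitAux (l : List Char) : ∀ (w : List Char),
    PySem.Chars.join [' '] ((splitAux w l).map solAWord) = fk 0 w ++ specFun l w.length := by
  induction l with
  | nil =>
    intro w
    simp [splitAux, specFun, PySem.Chars.join_singleton, solAWord_eq]
  | cons c rest ih =>
    intro w
    by_cases hc : c = ' '
    · subst hc
      obtain ⟨x, xs, hx⟩ : ∃ x xs, splitAux ([] : List Char) rest = x :: xs := by
        cases h : splitAux ([] : List Char) rest with
        | nil => exact absurd h (splitAux_ne_nil [] rest)
        | cons x xs => exact ⟨x, xs, rfl⟩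
      rw [show splitAux w (' ' :: rest) = w :: splitAux [] rest from by simp [splitAux]]
      rw [hx, List.map_cons, List.map_cons, PySem.Chars.join_cons_cons, ← List.map_cons,
        ← hx, ih ([] : List Char)]
      simp [specFun, solAWord_eq, fk]
    · simp only [splitAux, if_neg hc, ih (w ++ [c]), fk_append, specFun]
      simp [fk, trc]

lemma b_fold (l : List Char) : ∀ (acc : List Char) (k : Nat),
    (l.foldl solBStep (acc, k)).1 = acc ++ specFun l k := by
  induction l with
  | nil => intro acc k; simp [specFun]
  | cons c rest ih =>
    intro acc k
    by_cases hc : c = ' '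
    · subst hc; simp [solBStep, specFun, ih]
    · simp [solBStep, hc, specFun, ih, trc]

-- ===== VERDICT (by name: the statement is the Claim_ definition above) =====
theorem solution_spec : Claim_equal_solution := by
  intro s _
  unfold Spec_solution solution solution_alt
  rw [splitOn_eq, foldl_snoc_eq_map, b_fold]

  have := join_map_splitAux s.toList []
  simp only [List.nil_append, List.length_nil] at this ⊢
  rw [this]
  simp [fk]
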